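-- pv_equiv track=rewrite | github.com/LlmKira/tagger-bot | app/controller.py | extract_between_multiple_markers
-- ===== SOURCE A (Python) =====
-- def extract_between_multiple_markers(input_list, start_markers, end_markers):
--     extracting = False
--     extracted_elements = []
--     for item in input_list:
--         # Check if the item contains any start marker
--         if any(start_marker in item for start_marker in start_markers):
--             extracting = True
--             # continue  # Skip appending the marker itself
--         if end_markers:
--             if any(end_marker in item for end_marker in end_markers):
--                 break
--         if extracting:
--             extracted_elements.append(item)
--     return extracted_elements
-- ===== SOURCE B (Python) =====
-- def extract_between_multiple_markers(input_list, start_markers, end_markers):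
--     s = next((i for i, item in enumerate(input_list)
--               if any(m in item for m in start_markers)), None)
--     if s is None:
--         return []
--     if end_markers:
--         e = next((i for i, item in enumerate(input_list)
--                   if any(m in item for m in end_markers)), len(input_list))
--     else:
--         e = len(input_list)
--     return list(input_list[s:e])
-- ===== Notes on version B (the rewrite author's own statement) =====
-- stated objective: simpler
-- what changed: Replaced the stateful per-item extracting flag with break inside one loop by a find-first-start-index / find-first-end-index / slice decomposition.
import Mathlib
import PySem

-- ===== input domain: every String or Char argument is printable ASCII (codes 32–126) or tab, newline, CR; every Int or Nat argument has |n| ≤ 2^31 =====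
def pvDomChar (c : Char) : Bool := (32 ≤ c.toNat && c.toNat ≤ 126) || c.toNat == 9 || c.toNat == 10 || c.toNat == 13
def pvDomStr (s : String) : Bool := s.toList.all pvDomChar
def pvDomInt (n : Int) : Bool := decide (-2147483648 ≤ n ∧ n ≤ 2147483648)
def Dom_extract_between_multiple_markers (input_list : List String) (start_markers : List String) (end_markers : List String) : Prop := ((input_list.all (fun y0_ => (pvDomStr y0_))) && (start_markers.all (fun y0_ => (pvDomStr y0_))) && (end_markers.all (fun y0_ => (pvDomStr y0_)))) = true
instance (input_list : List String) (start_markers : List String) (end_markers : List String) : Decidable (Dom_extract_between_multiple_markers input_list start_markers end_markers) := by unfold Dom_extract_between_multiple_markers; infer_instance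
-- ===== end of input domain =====

-- B replaces A's stateful extracting-flag loop with find-start-index / find-end-index / slice; same cost, simpler.

-- ===== PORT A =====
-- 'any(marker in item for marker in markers)'
def pvAnyIn (markers : List String) (item : String) : Bool :=
  markers.any (fun m => PySem.Str.isIn m item)

-- A's for-loop with break: state = (extracting, extracted_elements)
def pvALoop (start_markers end_markers : List String) :
    List String → Bool → List String → List String
  | [], _, acc => acc
  | item :: rest, extracting, acc =>
    let extracting := if pvAnyIn start_markers item then true else extracting
    if !end_markers.isEmpty && pvAnyIn end_markers item then acc
    else
      pvALoop start_markers end_markers rest extracting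
        (if extracting then acc ++ [item] else acc)

def extract_between_multiple_markers (input_list : List String) (start_markers : List String) (end_markers : List String) : List String :=
  pvALoop start_markers end_markers input_list false []

-- ===== PORT B =====
def extract_between_multiple_markers_alt (input_list : List String) (start_markers : List String) (end_markers : List String) : List String :=
  match input_list.findIdx? (fun item => pvAnyIn start_markers item) with
  | none => []
  | some s =>
    let e : Nat :=
      if end_markers.isEmpty then input_list.length
      else
        match input_list.findIdx? (fun item => pvAnyIn end_markers item) with
        | some e => e
        | none => input_list.length
    PySem.List.slice input_list (some (s : Int)) (some (e : Int))

-- ===== PRECONDITION & SPEC =====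
def Spec_extract_between_multiple_markers (input_list : List String) (start_markers : List String) (end_markers : List String) (out : List String) : Prop := out = extract_between_multiple_markers_alt input_list start_markers end_markers
instance (input_list : List String) (start_markers : List String) (end_markers : List String) (out : List String) : Decidable (Spec_extract_between_multiple_markers input_list start_markers end_markers out) := by unfold Spec_extract_between_multiple_markers; infer_instance

-- ===== CLAIM (what is proved, stated in full; the proofs are below) =====
def Claim_equal_extract_between_multiple_markers : Prop := ∀ (input_list : List String) (start_markers : List String) (end_markers : List String), Dom_extract_between_multiple_markers input_list start_markers end_markers → Spec_extract_between_multiple_markers input_list start_markers end_markers (extract_between_multiple_markers input_list start_markers end_markers)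

-- ===== LEMMAS AND PROOFS =====

-- the accumulator only collects output
theorem pvALoop_acc (sm em : List String) :
    ∀ (l : List String) (ext : Bool) (acc : List String),
      pvALoop sm em l ext acc = acc ++ pvALoop sm em l ext [] := by
  intro l
  induction l with
  | nil => intro ext acc; simp [pvALoop]
  | cons item rest ih =>
    intro ext acc
    simp only [pvALoop]
    by_cases hq : (!em.isEmpty && pvAnyIn em item) = true
    · simp [hq]
    · simp only [Bool.not_eq_true] at hq
      simp only [hq, Bool.false_eq_true, if_false]
      by_cases hs : pvAnyIn sm item = true
      · simp only [hs, if_true]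
        rw [ih true (acc ++ [item]), ih true ([] ++ [item])]
        simp
      · simp only [Bool.not_eq_true] at hs
        simp only [hs, Bool.false_eq_true, if_false]
        by_cases he : ext = true
        · subst he
          simp only [reduceIte]
          rw [ih true (acc ++ [item]), ih true ([] ++ [item])]
          simp
        · simp only [Bool.not_eq_true] at he
          subst he
          simp only [Bool.false_eq_true, if_false]
          exact ih false acc

-- once extracting, A takes items until the first end-marker item (everything if break can't fire)
theorem pvALoop_true (sm em : List String) :
    ∀ (l : List String),
      pvALoop sm em l true [] =
        l.takeWhile (fun x => !(!em.isEmpty && pvAnyIn em x)) := by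
  intro l
  induction l with
  | nil => simp [pvALoop]
  | cons item rest ih =>
    simp only [pvALoop, List.takeWhile]
    by_cases hq : (!em.isEmpty && pvAnyIn em item) = true
    · simp [hq]
    · simp only [Bool.not_eq_true] at hq
      simp only [hq, Bool.false_eq_true, if_false, Bool.not_false]
      have h1 : (if pvAnyIn sm item = true then true else true) = true := by
        split <;> rfl
      simp only [h1, reduceIte]
      rw [pvALoop_acc sm em rest true ([] ++ [item]), ih]
      simp

-- takeWhile(!p) is take-to-the-first-index-where-p (list length when none)
theorem takeWhile_eq_take_findIdx {α : Type} (p : α → Bool) :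
    ∀ (l : List α),
      l.takeWhile (fun x => !p x) =
        l.take (match l.findIdx? p with | some i => i | none => l.length) := by
  intro l
  induction l with
  | nil => simp
  | cons x rest ih =>
    by_cases hp : p x = true
    · simp [List.takeWhile, List.findIdx?_cons, hp]
    · simp only [Bool.not_eq_true] at hp
      simp only [List.takeWhile, hp, Bool.not_false, List.findIdx?_cons, Bool.false_eq_true,
        if_false]
      rw [ih]
      cases hfi : rest.findIdx? p <;> simp

theorem pv_main (sm em : List String) :
    ∀ (il : List String),
      pvALoop sm em il false [] = extract_between_multiple_markers_alt il sm em := by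
  intro il
  induction il with
  | nil => simp [pvALoop, extract_between_multiple_markers_alt]
  | cons item rest ih =>
    simp only [pvALoop]
    by_cases hq : (!em.isEmpty && pvAnyIn em item) = true
    · -- break on the first item: A returns []; B's e = 0
      obtain ⟨hne, hpe⟩ : em.isEmpty = false ∧ pvAnyIn em item = true := by
        simpa using hq
      simp only [hq, if_true]
      unfold extract_between_multiple_markers_alt
      cases hfs : (item :: rest).findIdx? (fun it => pvAnyIn sm it) with
      | none => simp
      | some s =>
        simp only [hne, Bool.false_eq_true, if_false, List.findIdx?_cons, hpe, if_true]
        rw [PySem.List.slice_natCast]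
        simp
    · simp only [Bool.not_eq_true] at hq
      simp only [hq, Bool.false_eq_true, if_false]
      by_cases hs : pvAnyIn sm item = true
      · -- a start marker in the first item: both sides keep it and run to the end index
        simp only [hs, if_true]
        rw [pvALoop_acc sm em rest true ([] ++ [item]), pvALoop_true sm em rest,
            takeWhile_eq_take_findIdx]
        unfold extract_between_multiple_markers_alt
        simp only [List.findIdx?_cons, hs, if_true]
        by_cases hem : em.isEmpty = true
        · have hall : List.findIdx? (fun _ : String => false) rest = none := by
            rw [List.findIdx?_eq_none_iff]; simp
          simp only [hem, if_true]
          rw [PySem.List.slice_natCast]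
          simp [hall]
        · have hem' : em.isEmpty = false := by simpa using hem
          have hpe : pvAnyIn em item = false := by
            simpa [hem'] using hq
          simp only [hem', Bool.false_eq_true, if_false, hpe, Bool.not_false, Bool.true_and]
          rw [PySem.List.slice_natCast]
          cases hfe : rest.findIdx? (fun x => pvAnyIn em x) <;> simp
      · -- no marker at all in the first item: both sides skip it
        simp only [Bool.not_eq_true] at hs
        simp only [hs, Bool.false_eq_true, if_false, List.nil_append]
        rw [ih]
        unfold extract_between_multiple_markers_alt
        simp only [List.findIdx?_cons, hs, Bool.false_eq_true, if_false]
        cases hfs : rest.findIdx? (fun it => pvAnyIn sm it) with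
        | none => simp
        | some s =>
          simp only [Option.map_some]
          by_cases hem : em.isEmpty = true
          · simp only [hem, if_true, List.length_cons]
            rw [PySem.List.slice_natCast]
            rw [PySem.List.slice_natCast]
            simp [Nat.succ_sub_succ]
          · have hem' : em.isEmpty = false := by simpa using hem
            have hpe : pvAnyIn em item = false := by
              simpa [hem'] using hq
            simp only [hem', Bool.false_eq_true, if_false, hpe]
            cases hfe : rest.findIdx? (fun x => pvAnyIn em x) with
            | none =>
              simp only [Option.map_none, List.length_cons]
              rw [PySem.List.slice_natCast, PySem.List.slice_natCast]
              simp [Nat.succ_sub_succ]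
            | some e =>
              simp only [Option.map_some]
              rw [PySem.List.slice_natCast, PySem.List.slice_natCast]
              simp [Nat.succ_sub_succ]

-- ===== VERDICT (by name: the statement is the Claim_ definition above) =====
theorem extract_between_multiple_markers_spec : Claim_equal_extract_between_multiple_markers := by
  intro il sm em _
  unfold Spec_extract_between_multiple_markers extract_between_multiple_markers
  exact pv_main sm em il
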